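-- pv_equiv track=rewrite | github.com/01110011011101010110010001101111/cia | lab03/sim/test_top_level.py | polynomial_mult
-- ===== SOURCE A (Python) =====
-- N = 100
--
-- q = 2**16
--
-- def polynomial_mult(s0, s1, size=N, base=q):
--     result = [0] * (size)
--
--     # Multiply the coefficients
--     for i in range(len(s0)):
--         for j in range(len(s1)):
--             if i + j < size:
--                 result[i + j] += s0[i] * s1[j]
--
--     for i in range(len(result)):
--         result[i] = result[i] % base
--
--     return result
-- ===== SOURCE B (Python) =====
-- N = 100
--
-- q = 2**16
--
-- def polynomial_mult(s0, s1, size=N, base=q):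
--     n, m = len(s0), len(s1)
--     return [sum(s0[i] * s1[k - i] for i in range(max(0, k - m + 1), min(k + 1, n))) % base
--             for k in range(size)]
-- ===== Notes on version B (the rewrite author's own statement) =====
-- stated objective: faster
-- what changed: Instead of A's input-driven double loop that mutates a result buffer over all n*m index pairs and then mods in a second pass, B computes each of the `size` output coefficients directly as a closed-form window sum sum(s0[i]*s1[k-i]) over the only indices that can contribute, in one comprehension.
import Mathlib
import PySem

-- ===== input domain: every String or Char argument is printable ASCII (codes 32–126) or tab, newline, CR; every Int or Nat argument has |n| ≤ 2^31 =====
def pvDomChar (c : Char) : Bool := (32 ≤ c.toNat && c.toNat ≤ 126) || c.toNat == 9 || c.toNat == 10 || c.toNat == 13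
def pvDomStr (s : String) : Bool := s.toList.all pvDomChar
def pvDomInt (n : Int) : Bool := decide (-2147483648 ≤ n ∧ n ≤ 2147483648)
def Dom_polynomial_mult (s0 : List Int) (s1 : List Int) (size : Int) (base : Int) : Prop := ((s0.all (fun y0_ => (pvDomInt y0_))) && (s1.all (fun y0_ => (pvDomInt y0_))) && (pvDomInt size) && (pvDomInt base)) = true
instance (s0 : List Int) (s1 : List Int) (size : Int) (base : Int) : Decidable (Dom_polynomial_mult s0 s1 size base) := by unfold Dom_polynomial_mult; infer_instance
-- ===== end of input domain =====

-- B replaces A's mutate-a-buffer double loop by a per-coefficient closed-form window sum;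
-- it only scans the index pairs that can contribute to the first `size` coefficients.

-- ===== PORT A =====
-- A: allocate result of `size` zeros, scatter s0[i]*s1[j] into result[i+j] for all pairs
-- with i+j < size, then mod every entry by base.
def polynomial_mult (s0 : List Int) (s1 : List Int) (size : Int) (base : Int) : List Int :=
  ((List.range s0.length).foldl (fun (r : List Int) (i : Nat) =>
      (List.range s1.length).foldl (fun (r : List Int) (j : Nat) =>
          if (i : Int) + (j : Int) < size then
            r.set (i + j) (r.getD (i + j) 0 + s0.getD i 0 * s1.getD j 0)
          else r) r)
    (List.replicate size.toNat 0)).map (fun x => PySem.Int.mod x base)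

-- ===== PORT B =====
-- B: for each k in range(size), sum s0[i]*s1[k-i] over i in range(max(0,k-m+1), min(k+1,n)),
-- then mod base.  (Nat subtraction k+1-m equals Python's max(0, k-m+1) for k ≥ 0.)
def polynomial_mult_alt (s0 : List Int) (s1 : List Int) (size : Int) (base : Int) : List Int :=
  let n := s0.length
  let m := s1.length
  (List.range size.toNat).map (fun k =>
    PySem.Int.mod
      (((List.range' (k + 1 - m) (min (k + 1) n - (k + 1 - m))).map
          (fun i => s0.getD i 0 * s1.getD (k - i) 0)).sum)
      base)

-- ===== PRECONDITION & SPEC =====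
-- Pre_ excludes base = 0 together with size > 0: there Python A raises ZeroDivisionError.
def Pre_polynomial_mult (s0 : List Int) (s1 : List Int) (size : Int) (base : Int) : Prop :=
  base ≠ 0 ∨ size ≤ 0
instance (s0 : List Int) (s1 : List Int) (size : Int) (base : Int) : Decidable (Pre_polynomial_mult s0 s1 size base) := by unfold Pre_polynomial_mult; infer_instance

def pvWitness_polynomial_mult : List Int × List Int × Int × Int := ([1, 2], [3, 4], 5, 7)

def Spec_polynomial_mult (s0 : List Int) (s1 : List Int) (size : Int) (base : Int) (out : List Int) : Prop := out = polynomial_mult_alt s0 s1 size base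
instance (s0 : List Int) (s1 : List Int) (size : Int) (base : Int) (out : List Int) : Decidable (Spec_polynomial_mult s0 s1 size base out) := by unfold Spec_polynomial_mult; infer_instance

-- ===== CLAIM (what is proved, stated in full; the proofs are below) =====
def Claim_equal_polynomial_mult : Prop := ∀ (s0 : List Int) (s1 : List Int) (size : Int) (base : Int), Dom_polynomial_mult s0 s1 size base → Pre_polynomial_mult s0 s1 size base → Spec_polynomial_mult s0 s1 size base (polynomial_mult s0 s1 size base)

-- ===== LEMMAS AND PROOFS =====

theorem pv_getD_set (r : List Int) (t : Nat) (a : Int) (k : Nat) :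
    (r.set t a).getD k 0 = if t = k ∧ t < r.length then a else r.getD k 0 := by
  simp only [List.getD_eq_getElem?_getD, List.getElem?_set]
  split_ifs with h1 h2 h3 <;> simp_all <;> omega

theorem pv_scatter_length (i : Nat) (size : Int) (g : Nat → Int) (m : Nat) :
    ∀ (r : List Int),
    ((List.range m).foldl (fun (r : List Int) (j : Nat) =>
        if (i : Int) + (j : Int) < size then
          r.set (i + j) (r.getD (i + j) 0 + g j)
        else r) r).length = r.length := by
  induction m with
  | zero => intro r; simp
  | succ m ih =>
      intro r
      rw [List.range_succ, List.foldl_append]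
      simp only [List.foldl_cons, List.foldl_nil]
      split_ifs with hc
      · rw [List.length_set]; exact ih r
      · exact ih r

theorem pv_scatter_getD (i : Nat) (size : Int) (g : Nat → Int) (m : Nat) :
    ∀ (r : List Int) (k : Nat), r.length = size.toNat →
    ((List.range m).foldl (fun (r : List Int) (j : Nat) =>
        if (i : Int) + (j : Int) < size then
          r.set (i + j) (r.getD (i + j) 0 + g j)
        else r) r).getD k 0
      = r.getD k 0 + (if i ≤ k ∧ k - i < m ∧ k < size.toNat then g (k - i) else 0) := by
  induction m with
  | zero => intro r k hr; simp
  | succ m ih =>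
      intro r k hr
      rw [List.range_succ, List.foldl_append]
      simp only [List.foldl_cons, List.foldl_nil]
      have hlen : ((List.range m).foldl (fun (r : List Int) (j : Nat) =>
          if (i : Int) + (j : Int) < size then
            r.set (i + j) (r.getD (i + j) 0 + g j)
          else r) r).length = size.toNat := by
        rw [pv_scatter_length, hr]
      by_cases hc : (i : Int) + (m : Int) < size
      · rw [if_pos hc, pv_getD_set, hlen]
        have hsz : i + m < size.toNat := by omega
        by_cases hk : i + m = k
        · subst hk
          rw [if_pos ⟨rfl, hsz⟩, ih r (i + m) hr,
            if_neg (show ¬(i ≤ i + m ∧ i + m - i < m ∧ i + m < size.toNat) by omega), add_zero,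
            if_pos (show i ≤ i + m ∧ i + m - i < m + 1 ∧ i + m < size.toNat by omega)]
          have hmi : i + m - i = m := by omega
          rw [hmi]
        · rw [if_neg (by tauto), ih r k hr]
          congr 1
          exact if_congr (by omega) rfl rfl
      · rw [if_neg hc, ih r k hr]
        congr 1
        have hsz : ¬ (i + m < size.toNat) := by omega
        exact if_congr (by omega) rfl rfl

theorem pv_outer_length (s0 s1 : List Int) (size : Int) (n : Nat) :
    ((List.range n).foldl (fun (r : List Int) (i : Nat) =>
        (List.range s1.length).foldl (fun (r : List Int) (j : Nat) =>
            if (i : Int) + (j : Int) < size then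
              r.set (i + j) (r.getD (i + j) 0 + s0.getD i 0 * s1.getD j 0)
            else r) r)
      (List.replicate size.toNat 0)).length = size.toNat := by
  induction n with
  | zero => simp
  | succ n ih =>
      rw [List.range_succ, List.foldl_append]
      simp only [List.foldl_cons, List.foldl_nil]
      rw [pv_scatter_length]; exact ih

theorem pv_outer_getD (s0 s1 : List Int) (size : Int) (n : Nat) (k : Nat) :
    ((List.range n).foldl (fun (r : List Int) (i : Nat) =>
        (List.range s1.length).foldl (fun (r : List Int) (j : Nat) =>
            if (i : Int) + (j : Int) < size then
              r.set (i + j) (r.getD (i + j) 0 + s0.getD i 0 * s1.getD j 0)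
            else r) r)
      (List.replicate size.toNat 0)).getD k 0
    = ((List.range n).map (fun i =>
        if i ≤ k ∧ k - i < s1.length ∧ k < size.toNat then s0.getD i 0 * s1.getD (k - i) 0
        else 0)).sum := by
  induction n with
  | zero => simp [List.getD_eq_getElem?_getD]
  | succ n ih =>
      rw [List.range_succ, List.foldl_append, List.map_append, List.sum_append]
      simp only [List.foldl_cons, List.foldl_nil, List.map_cons, List.map_nil, List.sum_cons,
        List.sum_nil, add_zero]
      rw [pv_scatter_getD n size (fun j => s0.getD n 0 * s1.getD j 0) s1.length _ k
            (pv_outer_length s0 s1 size n), ih]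

theorem pv_window_sum (f : Nat → Int) (a b : Nat) (n : Nat) (hb : b ≤ n) :
    ((List.range' a (b - a)).map f).sum
      = ((List.range n).map (fun i => if a ≤ i ∧ i < b then f i else 0)).sum := by
  induction n with
  | zero =>
      have : b = 0 := by omega
      simp [this]
  | succ n ih =>
      rw [List.range_succ, List.map_append, List.sum_append]
      simp only [List.map_cons, List.map_nil, List.sum_cons, List.sum_nil, add_zero]
      by_cases hbn : b ≤ n
      · rw [ih hbn]
        have : ¬(a ≤ n ∧ n < b) := by omega
        rw [if_neg this, add_zero]
      · have hb1 : b = n + 1 := by omega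
        subst hb1
        by_cases ha : a ≤ n
        · have hlen : n + 1 - a = (n - a) + 1 := by omega
          rw [hlen, List.range'_concat, List.map_append, List.sum_append]
          have han : a + (n - a) = n := by omega
          have hrec : ((List.range' a (n - a)).map f).sum
              = ((List.range n).map (fun i => if a ≤ i ∧ i < n + 1 then f i else 0)).sum := by
            have := pv_window_sum f a n n (le_refl n)
            rw [this]
            apply congrArg
            apply List.map_congr_left
            intro x hx
            have : x < n := List.mem_range.mp hx
            exact if_congr (by omega) rfl rfl
          rw [hrec]
          simp only [one_mul, List.map_cons, List.map_nil, List.sum_cons, List.sum_nil,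
            add_zero, han]
          rw [if_pos ⟨ha, by omega⟩]
        · have : n + 1 - a = 0 := by omega
          rw [this]
          simp only [List.range'_zero, List.map_nil, List.sum_nil]
          have hz : ((List.range n).map (fun i => if a ≤ i ∧ i < n + 1 then f i else 0)).sum = 0 := by
            apply List.sum_eq_zero
            intro x hx
            rcases List.mem_map.mp hx with ⟨i, hi, hix⟩
            have : i < n := List.mem_range.mp hi
            rw [if_neg (by omega)] at hix
            exact hix.symm
          rw [hz]
          rw [if_neg (by omega), zero_add]

theorem pv_coeff_eq (s0 s1 : List Int) (size : Int) (k : Nat) (hk : k < size.toNat) :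
    ((List.range' (k + 1 - s1.length) (min (k + 1) s0.length - (k + 1 - s1.length))).map
        (fun i => s0.getD i 0 * s1.getD (k - i) 0)).sum
      = ((List.range s0.length).map (fun i =>
          if i ≤ k ∧ k - i < s1.length ∧ k < size.toNat then s0.getD i 0 * s1.getD (k - i) 0
          else 0)).sum := by
  set n := s0.length
  set m := s1.length
  by_cases hmn : k + 1 - m ≤ min (k + 1) n
  · have hsplit : min (k + 1) n - (k + 1 - m) = min (k + 1) n - (k + 1 - m) := rfl
    rw [pv_window_sum (fun i => s0.getD i 0 * s1.getD (k - i) 0) (k + 1 - m) (min (k + 1) n) n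
          (by omega)]
    apply congrArg
    apply List.map_congr_left
    intro i hi
    have hin : i < n := List.mem_range.mp hi
    exact if_congr (by omega) rfl rfl
  · -- k + 1 - m > min (k+1) n: empty window, and every condition fails
    have h0 : min (k + 1) n - (k + 1 - m) = 0 := by omega
    rw [h0]
    simp only [List.range'_zero, List.map_nil, List.sum_nil]
    symm
    apply List.sum_eq_zero
    intro x hx
    rcases List.mem_map.mp hx with ⟨i, hi, hix⟩
    have hin : i < n := List.mem_range.mp hi
    rw [if_neg (by omega)] at hix
    exact hix.symm

theorem pv_main (s0 s1 : List Int) (size base : Int) :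
    polynomial_mult s0 s1 size base = polynomial_mult_alt s0 s1 size base := by
  simp only [polynomial_mult, polynomial_mult_alt]
  apply List.ext_getElem
  · rw [List.length_map, List.length_map, pv_outer_length, List.length_range]
  · intro k h1 h2
    have hk : k < size.toNat := by
      rw [List.length_map, pv_outer_length] at h1; exact h1
    rw [List.getElem_map, List.getElem_map, List.getElem_range,
      ← List.getD_eq_getElem _ 0 (by rw [pv_outer_length]; exact hk),
      pv_outer_getD, ← pv_coeff_eq s0 s1 size k hk]

-- ===== VERDICT (by name: the statement is the Claim_ definition above) =====
theorem polynomial_mult_spec : Claim_equal_polynomial_mult := by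
  intro s0 s1 size base _ _
  unfold Spec_polynomial_mult
  exact pv_main s0 s1 size base
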